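-- pv_equiv track=rewrite | github.com/Jedyle/musiroom-public | musiroom/albums/scraper.py | merge_identical
-- ===== SOURCE A (Python) =====
-- def merge_identical(discog):
--     n = len(discog)
--     merged = []
--     i = 0
--     while i < n:
--         elt = discog[i]
--         while i + 1 < n and discog[i][0] == discog[i + 1][0]:
--             elt[1].extend(discog[i + 1][1])
--             i = i + 1
--         i = i + 1
--         merged.append(elt)
--     return merged
-- ===== SOURCE B (Python) =====
-- def merge_identical(discog):
--     # stage 1: partition into maximal runs of adjacent equal-keyed entries
--     groups = []
--     for p in discog:
--         if groups and groups[-1][-1][0] == p[0]: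
--             groups[-1].append(p)
--         else:
--             groups.append([p])
--     # stage 2: collapse each run into its first element
--     merged = []
--     for g in groups:
--         elt = g[0]
--         for p in g[1:]:
--             elt[1].extend(p[1])
--         merged.append(elt)
--     return merged
-- ===== Notes on version B (the rewrite author's own statement) =====
-- stated objective: alternative
-- what changed: Two staged passes over an intermediate grouped structure: first partition the list into maximal runs of adjacent equal-keyed entries, then collapse each run into its first element, instead of A's single index walk with a nested lookahead while loop.
import Mathlib
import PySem

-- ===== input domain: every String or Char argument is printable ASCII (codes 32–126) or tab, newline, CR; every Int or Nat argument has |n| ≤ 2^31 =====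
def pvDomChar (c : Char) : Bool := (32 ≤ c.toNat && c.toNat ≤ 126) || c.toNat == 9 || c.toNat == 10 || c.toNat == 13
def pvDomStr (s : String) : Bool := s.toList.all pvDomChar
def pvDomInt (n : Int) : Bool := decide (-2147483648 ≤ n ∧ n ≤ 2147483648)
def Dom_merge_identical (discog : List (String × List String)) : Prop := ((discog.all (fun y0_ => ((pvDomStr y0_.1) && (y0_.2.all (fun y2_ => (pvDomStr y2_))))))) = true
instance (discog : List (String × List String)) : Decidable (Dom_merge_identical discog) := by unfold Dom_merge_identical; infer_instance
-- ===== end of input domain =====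

-- B replaces A's index walk with nested lookahead while-loops by two staged passes over an
-- intermediate grouped structure (partition into adjacent equal-key runs, then collapse each
-- run into its first element) (objective: alternative). Both Pythons mutate input sublists in
-- place; the equivalence proved here is about the return value.


-- ===== PORT A =====
-- discog[i] (always in range when accessed, since 0 ≤ i < n = len(discog))
def pairGetD (l : List (String × List String)) (i : Nat) : String × List String :=
  l.getD i ("", [])

-- inner while loop of A: repeatedly extends elt's snd with the next entry's snd while
-- adjacent keys are equal; returns the final (elt, i)
def mergeInner (discog : List (String × List String)) (n : Nat)
    (elt : String × List String) (i : Nat) : (String × List String) × Nat :=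
  if h : i + 1 < n ∧ (pairGetD discog i).1 == (pairGetD discog (i + 1)).1 then
    mergeInner discog n (elt.1, elt.2 ++ (pairGetD discog (i + 1)).2) (i + 1)
  else (elt, i)
termination_by n - i
decreasing_by omega

theorem mergeInner_ge (discog : List (String × List String)) (n : Nat)
    (elt : String × List String) (i : Nat) : i ≤ (mergeInner discog n elt i).2 := by
  fun_induction mergeInner with
  | case1 elt i h ih => omega
  | case2 _ _ _ => simp

-- outer while loop of A
def mergeOuter (discog : List (String × List String)) (n : Nat) (i : Nat)
    (merged : List (String × List String)) : List (String × List String) :=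
  if h : i < n then
    mergeOuter discog n ((mergeInner discog n (pairGetD discog i) i).2 + 1)
      (merged ++ [(mergeInner discog n (pairGetD discog i) i).1])
  else merged
termination_by n - i
decreasing_by have := mergeInner_ge discog n (pairGetD discog i) i; omega

def merge_identical (discog : List (String × List String)) : List (String × List String) :=
  mergeOuter discog discog.length 0 []

-- ===== PORT B =====
-- groups[-1].append(p): append p to the last group
def appendToLast : List (List (String × List String)) → (String × List String) →
    List (List (String × List String))
  | [], _ => []
  | [g], p => [g ++ [p]]
  | g :: h :: rest, p => g :: appendToLast (h :: rest) p

-- one iteration of B's first (grouping) pass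
def groupStep (groups : List (List (String × List String))) (p : String × List String) :
    List (List (String × List String)) :=
  if groups ≠ [] ∧ (((groups.getLastD []).getLastD ("", [])).1 == p.1) then
    appendToLast groups p
  else groups ++ [[p]]

-- B's second pass on one run: elt = g[0]; for p in g[1:]: elt[1].extend(p[1])
def collapseRun (g : List (String × List String)) : String × List String :=
  (g.drop 1).foldl (fun elt p => (elt.1, elt.2 ++ p.2)) (g.headD ("", []))

def merge_identical_alt (discog : List (String × List String)) : List (String × List String) :=
  let groups := discog.foldl groupStep []
  groups.foldl (fun merged g => merged ++ [collapseRun g]) []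

-- ===== PRECONDITION & SPEC =====
def Spec_merge_identical (discog : List (String × List String)) (out : List (String × List String)) : Prop := out = merge_identical_alt discog
instance (discog : List (String × List String)) (out : List (String × List String)) : Decidable (Spec_merge_identical discog out) := by unfold Spec_merge_identical; infer_instance

-- ===== CLAIM (what is proved, stated in full; the proofs are below) =====
def Claim_equal_merge_identical : Prop := ∀ (discog : List (String × List String)), Dom_merge_identical discog → Spec_merge_identical discog (merge_identical discog)

-- ===== LEMMAS AND PROOFS =====

-- canonical "group adjacent equal keys" function A's port is reduced to
def canon : List (String × List String) → List (String × List String)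
  | [] => []
  | (k, v) :: rest =>
      (k, v ++ (rest.takeWhile (fun p => p.1 == k)).flatMap Prod.snd) ::
        canon (rest.dropWhile (fun p => p.1 == k))
termination_by l => l.length
decreasing_by
  have := List.length_dropWhile_le (fun p => p.1 == k) rest
  simp; omega

-- the grouped structure B's first pass is reduced to
def gcanon : List (String × List String) → List (List (String × List String))
  | [] => []
  | p :: rest =>
      (p :: rest.takeWhile (fun q => q.1 == p.1)) ::
        gcanon (rest.dropWhile (fun q => q.1 == p.1))
termination_by l => l.length
decreasing_by
  have := List.length_dropWhile_le (fun q => q.1 == p.1) rest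
  simp; omega

theorem drop_length_takeWhile {α : Type} (p : α → Bool) (l : List α) :
    l.drop (l.takeWhile p).length = l.dropWhile p := by
  induction l with
  | nil => rfl
  | cons a l ih =>
    by_cases h : p a
    · simp [h, ih]
    · simp [h]

theorem pairGetD_eq_getElem (l : List (String × List String)) (i : Nat) (h : i < l.length) :
    pairGetD l i = l[i] := by
  simp [pairGetD, List.getD_eq_getElem?_getD, List.getElem?_eq_getElem h]

theorem mergeInner_char (discog : List (String × List String)) (elt : String × List String)
    (i : Nat) :
    mergeInner discog discog.length elt i =
      ((elt.1, elt.2 ++ (((discog.drop (i + 1)).takeWhile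
          (fun p => p.1 == (pairGetD discog i).1)).flatMap Prod.snd)), i +
        ((discog.drop (i + 1)).takeWhile (fun p => p.1 == (pairGetD discog i).1)).length) := by
  fun_induction mergeInner with
  | case1 elt i h ih =>
    obtain ⟨hlt, hkey⟩ := h
    have hi1 : i + 1 < discog.length := hlt
    have hdrop : discog.drop (i + 1) = discog[i + 1] :: discog.drop (i + 1 + 1) :=
      List.drop_eq_getElem_cons hi1
    have hg : pairGetD discog (i + 1) = discog[i + 1] := pairGetD_eq_getElem _ _ hi1
    have hkeq : (discog[i + 1]).1 = (pairGetD discog i).1 := by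
      have h2 := eq_of_beq hkey; rw [hg] at h2; exact h2.symm
    rw [ih, hdrop]
    simp only [List.takeWhile_cons, hg, hkeq, beq_self_eq_true, if_true, List.flatMap_cons,
      List.length_cons, List.append_assoc, Prod.mk.injEq, true_and]
    omega
  | case2 elt i h =>
    rw [Decidable.not_and_iff_not_or_not] at h
    have hnil : (discog.drop (i + 1)).takeWhile (fun p => p.1 == (pairGetD discog i).1) = [] := by
      rcases h with h | h
      · have : discog.drop (i + 1) = [] := List.drop_eq_nil_of_le (by omega)
        simp [this]
      · rcases hd : discog.drop (i + 1) with _ | ⟨a, rest⟩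
        · simp
        · have hi1 : i + 1 < discog.length := by
            by_contra hc
            rw [List.drop_eq_nil_of_le (by omega)] at hd
            simp at hd
          have hh : discog.drop (i + 1) = discog[i + 1] :: discog.drop (i + 1 + 1) :=
            List.drop_eq_getElem_cons hi1
          have ha : a = discog[i + 1] := by rw [hd] at hh; exact (List.cons.inj hh).1
          have hg : pairGetD discog (i + 1) = discog[i + 1] := pairGetD_eq_getElem _ _ hi1
          have hfalse : (a.1 == (pairGetD discog i).1) = false := by
            rw [ha, ← hg]
            simp only [beq_eq_false_iff_ne, ne_eq]
            intro e
            exact h (by simp [e])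
          simp [hfalse]
    simp [hnil]

theorem mergeOuter_char (discog : List (String × List String)) (i : Nat)
    (merged : List (String × List String)) :
    mergeOuter discog discog.length i merged = merged ++ canon (discog.drop i) := by
  fun_induction mergeOuter with
  | case1 i merged h ih =>
    rw [ih, mergeInner_char]
    have hg : pairGetD discog i = discog[i] := pairGetD_eq_getElem _ _ h
    have hdrop : discog.drop i = discog[i] :: discog.drop (i + 1) :=
      List.drop_eq_getElem_cons h
    rcases hkv : discog[i] with ⟨k, v⟩
    rw [hg, hkv]
    have hdd : List.drop
          (i + (List.takeWhile (fun p => p.1 == k) (List.drop (i + 1) discog)).length + 1) discog =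
        List.dropWhile (fun p => p.1 == k) (List.drop (i + 1) discog) := by
      rw [← drop_length_takeWhile (fun p => p.1 == k) (List.drop (i + 1) discog),
        List.drop_drop]
      congr 1
      omega
    rw [hdd, hdrop, hkv]
    simp [canon]
  | case2 i merged h =>
    rw [List.drop_eq_nil_of_le (by omega)]
    simp [canon]

theorem appendToLast_concat (acc : List (List (String × List String)))
    (g : List (String × List String)) (p : String × List String) :
    appendToLast (acc ++ [g]) p = acc ++ [g ++ [p]] := by
  induction acc with
  | nil => rfl
  | cons a acc ih =>
    cases acc with
    | nil => simp [appendToLast]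
    | cons b acc => simp [appendToLast] at ih ⊢; exact ih

theorem getLastD_all_key (g : List (String × List String)) (k : String) (hg : g ≠ [])
    (hk : ∀ x ∈ g, x.1 = k) : (g.getLastD ("", [])).1 = k := by
  induction g with
  | nil => exact absurd rfl hg
  | cons a g ih =>
    cases g with
    | nil => exact hk a (by simp)
    | cons b g =>
      rw [List.getLastD_cons]
      exact ih (by simp) (fun x hx => hk x (by simp [hx]))

theorem groupStep_fold (l : List (String × List String))
    (acc : List (List (String × List String))) (g : List (String × List String)) (k : String)
    (hg : g ≠ []) (hk : ∀ x ∈ g, x.1 = k) :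
    l.foldl groupStep (acc ++ [g]) =
      acc ++ (g ++ l.takeWhile (fun q => q.1 == k)) :: gcanon (l.dropWhile (fun q => q.1 == k)) := by
  induction l generalizing acc g k with
  | nil => simp [gcanon]
  | cons e rest ih =>
    rw [List.foldl_cons]
    have hlast : ((acc ++ [g]).getLastD []).getLastD ("", []) = g.getLastD ("", []) := by
      rw [List.getLastD_concat]
    by_cases hek : e.1 = k
    · have hstep : groupStep (acc ++ [g]) e = acc ++ [g ++ [e]] := by
        rw [groupStep, if_pos, appendToLast_concat]
        refine ⟨by simp, ?_⟩
        rw [hlast, getLastD_all_key g k hg hk, hek]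
        simp
      rw [hstep, ih acc (g ++ [e]) k (by simp) (by
        intro x hx; rcases List.mem_append.mp hx with h | h
        · exact hk x h
        · simp at h; rw [h]; exact hek)]
      have : ((e.1 == k) : Bool) = true := by simp [hek]
      simp [this]
    · have hstep : groupStep (acc ++ [g]) e = (acc ++ [g]) ++ [[e]] := by
        rw [groupStep, if_neg]
        rintro ⟨-, hbeq⟩
        rw [hlast, getLastD_all_key g k hg hk] at hbeq
        exact hek (eq_of_beq hbeq).symm
      rw [hstep, ih (acc ++ [g]) [e] e.1 (by simp) (by simp)]
      have hfalse : ((e.1 == k) : Bool) = false := by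
        simp only [beq_eq_false_iff_ne, ne_eq]; exact hek
      simp [List.dropWhile_cons, hfalse, gcanon]

theorem group_eq_gcanon (l : List (String × List String)) :
    l.foldl groupStep [] = gcanon l := by
  cases l with
  | nil => simp [gcanon]
  | cons e rest =>
    have h0 : groupStep [] e = [] ++ [[e]] := by
      rw [groupStep, if_neg]; rintro ⟨h, -⟩; exact h rfl
    rw [List.foldl_cons, h0, groupStep_fold rest [] [e] e.1 (by simp) (by simp)]
    simp [gcanon]

theorem collapse_foldl (l : List (String × List String)) (k : String) (v : List String) :
    l.foldl (fun elt p => (elt.1, elt.2 ++ p.2)) (k, v) = (k, v ++ l.flatMap Prod.snd) := by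
  induction l generalizing v with
  | nil => simp
  | cons a l ih => simp [ih]

theorem collapseRun_cons (k : String) (v : List String) (tw : List (String × List String)) :
    collapseRun ((k, v) :: tw) = (k, v ++ tw.flatMap Prod.snd) := by
  simp [collapseRun, collapse_foldl]

theorem map_collapse_gcanon (l : List (String × List String)) :
    (gcanon l).map collapseRun = canon l := by
  fun_induction gcanon with
  | case1 => simp [canon]
  | case2 p rest ih =>
    rcases p with ⟨k, v⟩
    rw [List.map_cons, ih, collapseRun_cons, canon]

theorem foldl_append_eq_map (l : List (List (String × List String)))
    (acc : List (String × List String)) :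
    l.foldl (fun merged g => merged ++ [collapseRun g]) acc = acc ++ l.map collapseRun := by
  induction l generalizing acc with
  | nil => simp
  | cons a l ih => simp [ih]

theorem alt_eq_canon (l : List (String × List String)) : merge_identical_alt l = canon l := by
  rw [merge_identical_alt]
  simp only [group_eq_gcanon, foldl_append_eq_map, List.nil_append, map_collapse_gcanon]

-- ===== VERDICT (by name: the statement is the Claim_ definition above) =====
theorem merge_identical_spec : Claim_equal_merge_identical := by
  intro discog _
  unfold Spec_merge_identical
  rw [alt_eq_canon]
  show mergeOuter discog discog.length 0 [] = canon discog
  rw [mergeOuter_char]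
  simp
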